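-- pv_equiv track=rewrite | github.com/jseah/Event-Query-Language | eventsearch.py | chopeventlist
-- ===== SOURCE A (Python) =====
-- def keyinevent(e, key):
--     for field in e:
--         if field.lower() == key.lower():
--             return True
--     return False
--
-- def valuefromevent(e, key):
--     for field in e:
--         if field.lower() == key.lower():
--             return e[field]
--     return
--
-- def chopeventlist(eventList):       #assumes eventList is sorted by starttime
--     inadmission = False
--     eventcount = len(eventList)
--     choppedeventlist = []
--     i = 0
--     while True:
--         e = eventList[i]
--         key = 'description'
--         constraint = 'startadmission'
--         if not inadmission and keyinevent(e, key):
--             if constraint in valuefromevent(e, key):        #found startadmission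
--                 inadmission = True
--                 admissionstarttime = valuefromevent(e, 'starttime')
--                 admissionstartindex = i
--                 while True:                                 #backtrace to first event sharing same time as startadmission, excluding
--                     if not(admissionstartindex == 0):
--                         if valuefromevent(eventList[admissionstartindex - 1], 'starttime') == admissionstarttime:
--                             admissionstartindex = admissionstartindex - 1
--                         else:
--                             break
--                     else:
--                         break
--                 eventlistcol = []
--         if inadmission:
--             eventlistcol.append(e)
--             key = 'description'
--             constraint = 'endadmission'
--             if keyinevent(e, key):
--                 if constraint in valuefromevent(e, key):        #found endadmission
--                     inadmission = False
--                     admissionendtime = valuefromevent(e, 'starttime')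
--                     admissionendindex = i
--                     while True:
--                         if admissionendindex < eventcount - 1:
--                             if valuefromevent(eventList[admissionendindex + 1], 'starttime') == admissionendtime:
--                                 eventlistcol.append(eventList[admissionendindex + 1])
--                                 admissionendindex = admissionendindex + 1
--                             else:
--                                 break
--                         else:
--                             break
--                     i = admissionendindex
--                     choppedeventlist.append(eventlistcol)
--         i = i + 1
--         if i == eventcount:
--             break
--     return choppedeventlist
-- ===== SOURCE B (Python) =====
-- def valuefromevent(e, key):
--     for field in e:
--         if field.lower() == key.lower():
--             return e[field]
--     return
--
-- def descriptionhas(e, constraint):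
--     d = valuefromevent(e, 'description')
--     return d is not None and constraint in d
--
-- def chopeventlist(eventList):       #assumes eventList is sorted by starttime
--     n = len(eventList)
--     spans = []
--     i = 0
--     while i < n:
--         if descriptionhas(eventList[i], 'startadmission'):
--             j = i
--             while j < n and not descriptionhas(eventList[j], 'endadmission'):
--                 j = j + 1
--             if j == n:
--                 break                               # admission never closed: no group
--             t = valuefromevent(eventList[j], 'starttime')
--             k = j
--             while k + 1 < n and valuefromevent(eventList[k + 1], 'starttime') == t:
--                 k = k + 1
--             spans.append((i, k))
--             i = k + 1
--         else:
--             i = i + 1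
--     return [eventList[s:k + 1] for (s, k) in spans]
-- ===== Notes on version B (the rewrite author's own statement) =====
-- stated objective: simpler
-- what changed: A's single stateful scan (inadmission flag, in-loop collection list, manual index jumps, and a dead backtrace loop) is replaced by two passes: first collect the (start, end-after-same-time-extension) index spans, then slice each admission group out of the list; the dead backtrace loop is dropped.
import Mathlib
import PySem

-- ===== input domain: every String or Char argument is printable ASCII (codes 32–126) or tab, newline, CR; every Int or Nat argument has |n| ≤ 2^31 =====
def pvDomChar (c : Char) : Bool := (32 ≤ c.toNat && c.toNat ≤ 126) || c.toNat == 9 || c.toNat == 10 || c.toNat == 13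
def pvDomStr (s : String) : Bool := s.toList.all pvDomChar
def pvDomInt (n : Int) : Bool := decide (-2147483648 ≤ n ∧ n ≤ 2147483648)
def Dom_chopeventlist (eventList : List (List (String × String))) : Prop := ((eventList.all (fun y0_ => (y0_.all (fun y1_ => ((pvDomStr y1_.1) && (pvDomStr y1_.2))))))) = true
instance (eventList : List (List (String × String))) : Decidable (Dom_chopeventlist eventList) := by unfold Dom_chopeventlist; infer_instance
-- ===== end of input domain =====

-- B replaces A's single inadmission state machine by two passes — find (start,end) index
-- spans, then slice each group out of the list — dropping A's dead backtrace loop; objective: simpler.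

-- ===== PORT A =====
-- events are Python dicts (association lists, first-match lookup); `for field in e` walks the keys
def keyinevent : List (String × String) → String → Bool
  | [], _ => false
  | (k, _) :: rest, key =>
    if PySem.Str.lower k = PySem.Str.lower key then true else keyinevent rest key

-- `valuefromevent`: walk the keys, on the first case-insensitive match return e[field] (dict lookup)
def vfeAux (e : List (String × String)) : List (String × String) → String → Option String
  | [], _ => none
  | (k, _) :: rest, key =>
    if PySem.Str.lower k = PySem.Str.lower key then e.lookup k else vfeAux e rest key

def valuefromevent (e : List (String × String)) (key : String) : Option String := vfeAux e e key

-- A's inner `while True` backtrace loop (its result `admissionstartindex` is never read by A)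
def chopBacktrace (eventList : List (List (String × String))) (t : Option String) :
    Nat → Nat → Nat
  | 0, idx => idx
  | fuel + 1, idx =>
    if idx ≠ 0 then
      if valuefromevent (eventList.getD (idx - 1) []) "starttime" = t then
        chopBacktrace eventList t fuel (idx - 1)
      else idx
    else idx

-- A's inner `while True` forward extension after endadmission: returns (admissionendindex, eventlistcol)
def chopExtendA (eventList : List (List (String × String))) (n : Nat) (t : Option String) :
    Nat → Nat → List (List (String × String)) → Nat × List (List (String × String))
  | 0, idx, col => (idx, col)
  | fuel + 1, idx, col =>
    if idx < n - 1 then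
      if valuefromevent (eventList.getD (idx + 1) []) "starttime" = t then
        chopExtendA eventList n t fuel (idx + 1) (col ++ [eventList.getD (idx + 1) []])
      else (idx, col)
    else (idx, col)

-- A's outer `while True` loop; fuel = remaining iterations (i strictly increases, so length suffices);
-- pyGet? = none is exactly Python's IndexError on the empty list (excluded by Pre_)
def chopLoopA (eventList : List (List (String × String))) (n : Nat) :
    Nat → Nat → Bool → List (List (String × String)) → List (List (List (String × String))) →
    List (List (List (String × String)))
  | 0, _, _, _, acc => acc
  | fuel + 1, i, inadm, col, acc =>
    match PySem.List.pyGet? eventList (i : Int) with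
    | none => acc
    | some e =>
      let sc :=
        if !inadm && keyinevent e "description" then
          match valuefromevent e "description" with
          | some d =>
            if PySem.Str.isIn "startadmission" d then
              let _bt := chopBacktrace eventList (valuefromevent e "starttime") i i
              (true, ([] : List (List (String × String))))
            else (inadm, col)
          | none => (inadm, col)
        else (inadm, col)
      if sc.1 then
        let col2 := sc.2 ++ [e]
        let endHit :=
          keyinevent e "description" &&
            (match valuefromevent e "description" with
             | some d => PySem.Str.isIn "endadmission" d
             | none => false)
        if endHit then
          let t := valuefromevent e "starttime"
          let r := chopExtendA eventList n t (n - 1 - i) i col2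
          let acc1 := acc ++ [r.2]
          if r.1 + 1 = n then acc1 else chopLoopA eventList n fuel (r.1 + 1) false r.2 acc1
        else
          if i + 1 = n then acc else chopLoopA eventList n fuel (i + 1) true col2 acc
      else
        if i + 1 = n then acc else chopLoopA eventList n fuel (i + 1) false sc.2 acc

def chopeventlist (eventList : List (List (String × String))) : List (List (List (String × String))) :=
  chopLoopA eventList eventList.length eventList.length 0 false [] []

-- ===== PORT B =====
def descriptionhas (e : List (String × String)) (constraint : String) : Bool :=
  match valuefromevent e "description" with
  | some d => PySem.Str.isIn constraint d
  | none => false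

-- Source B's inner `while j < n and not ...` search for the closing endadmission event
def chopFindEnd (eventList : List (List (String × String))) (n : Nat) : Nat → Nat → Option Nat
  | 0, _ => none
  | fuel + 1, j =>
    if j < n then
      if descriptionhas (eventList.getD j []) "endadmission" then some j
      else chopFindEnd eventList n fuel (j + 1)
    else none

-- Source B's inner `while k + 1 < n and ...` same-starttime extension
def chopExtendB (eventList : List (List (String × String))) (n : Nat) (t : Option String) :
    Nat → Nat → Nat
  | 0, k => k
  | fuel + 1, k =>
    if k + 1 < n ∧ valuefromevent (eventList.getD (k + 1) []) "starttime" = t then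
      chopExtendB eventList n t fuel (k + 1)
    else k

-- Source B's outer `while i < n` loop collecting the (start, end) spans
def chopScanB (eventList : List (List (String × String))) (n : Nat) :
    Nat → Nat → List (Nat × Nat)
  | 0, _ => []
  | fuel + 1, i =>
    if i < n then
      if descriptionhas (eventList.getD i []) "startadmission" then
        match chopFindEnd eventList n (n - i) i with
        | some j =>
          let k := chopExtendB eventList n (valuefromevent (eventList.getD j []) "starttime") (n - 1 - j) j
          (i, k) :: chopScanB eventList n fuel (k + 1)
        | none => []
      else chopScanB eventList n fuel (i + 1)
    else []

def chopeventlist_alt (eventList : List (List (String × String))) : List (List (List (String × String))) :=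
  (chopScanB eventList eventList.length eventList.length 0).map
    (fun sk => PySem.List.slice eventList (some (sk.1 : Int)) (some ((sk.2 + 1 : Nat) : Int)))

-- ===== PRECONDITION & SPEC =====
-- Pre_ excludes only the empty list, on which Python A raises IndexError (eventList[0]).
def Pre_chopeventlist (eventList : List (List (String × String))) : Prop := eventList ≠ []
instance (eventList : List (List (String × String))) : Decidable (Pre_chopeventlist eventList) := by unfold Pre_chopeventlist; infer_instance

def pvWitness_chopeventlist : (List (List (String × String))) :=
  [[("description", "startadmission"), ("starttime", "1")],
   [("description", "endadmission"), ("starttime", "2")]]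

def Spec_chopeventlist (eventList : List (List (String × String))) (out : List (List (List (String × String)))) : Prop := out = chopeventlist_alt eventList
instance (eventList : List (List (String × String))) (out : List (List (List (String × String)))) : Decidable (Spec_chopeventlist eventList out) := by unfold Spec_chopeventlist; infer_instance

-- ===== CLAIM (what is proved, stated in full; the proofs are below) =====
def Claim_equal_chopeventlist : Prop := ∀ (eventList : List (List (String × String))), Dom_chopeventlist eventList → Pre_chopeventlist eventList → Spec_chopeventlist eventList (chopeventlist eventList)

-- ===== LEMMAS AND PROOFS =====

-- the group of events with indices j..k (all in range)
def chopSeg (eventList : List (List (String × String))) (j k : Nat) : List (List (String × String)) :=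
  (List.range' j (k + 1 - j)).map (fun t => eventList.getD t [])

theorem lookup_isSome_of_mem (l : List (String × String)) (k v : String) (h : (k,v) ∈ l) :
    (l.lookup k).isSome := by
  induction l with
  | nil => cases h
  | cons p t ih =>
    simp only [List.lookup]
    by_cases hk : k == p.1
    · simp [hk]
    · rcases List.mem_cons.mp h with h1 | h1
      · subst h1; simp at hk
      · simp [hk, ih h1]

theorem keyinevent_eq_isSome_aux (e : List (String × String)) (key : String) :
    ∀ r : List (String × String), (∀ p ∈ r, p ∈ e) →
      keyinevent r key = (vfeAux e r key).isSome := by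
  intro r
  induction r with
  | nil => intro _; rfl
  | cons p t ih =>
    intro hsub
    obtain ⟨k, v⟩ := p
    simp only [keyinevent, vfeAux]
    by_cases hk : PySem.Str.lower k = PySem.Str.lower key
    · simp only [hk]
      exact (lookup_isSome_of_mem e k v (hsub (k, v) (List.mem_cons_self))).symm
    · simp only [if_neg hk]
      exact ih (fun q hq => hsub q (List.mem_cons_of_mem _ hq))

theorem keyinevent_eq_isSome (e : List (String × String)) (key : String) :
    keyinevent e key = (valuefromevent e key).isSome :=
  keyinevent_eq_isSome_aux e key e (fun _ hp => hp)

theorem extendB_ge (eventList : List (List (String × String))) (n : Nat) (t : Option String) :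
    ∀ fuel idx, idx ≤ chopExtendB eventList n t fuel idx := by
  intro fuel
  induction fuel with
  | zero => intro idx; simp [chopExtendB]
  | succ f ih =>
    intro idx
    simp only [chopExtendB]
    split
    · exact le_trans (Nat.le_succ idx) (ih (idx + 1))
    · exact le_refl idx

theorem extendB_lt (eventList : List (List (String × String))) (n : Nat) (t : Option String) :
    ∀ fuel idx, idx < n → chopExtendB eventList n t fuel idx < n := by
  intro fuel
  induction fuel with
  | zero => intro idx h; simpa [chopExtendB] using h
  | succ f ih =>
    intro idx h
    simp only [chopExtendB]
    split
    · rename_i hc; exact ih (idx + 1) hc.1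
    · exact h

theorem extendA_eq (eventList : List (List (String × String))) (n : Nat) (t : Option String) :
    ∀ fuel idx col,
      chopExtendA eventList n t fuel idx col =
        (chopExtendB eventList n t fuel idx,
         col ++ (List.range' (idx + 1) (chopExtendB eventList n t fuel idx - idx)).map
           (fun q => eventList.getD q [])) := by
  intro fuel
  induction fuel with
  | zero => intro idx col; simp [chopExtendA, chopExtendB]
  | succ f ih =>
    intro idx col
    by_cases h1 : idx < n - 1
    · by_cases h2 : valuefromevent (eventList.getD (idx + 1) []) "starttime" = t
      · have hB : chopExtendB eventList n t (f + 1) idx = chopExtendB eventList n t f (idx + 1) := by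
          simp only [chopExtendB]; rw [if_pos ⟨by omega, h2⟩]
        have hK := extendB_ge eventList n t f (idx + 1)
        simp only [chopExtendA, if_pos h1, if_pos h2, hB, ih]
        rw [show chopExtendB eventList n t f (idx + 1) - idx
              = (chopExtendB eventList n t f (idx + 1) - (idx + 1)) + 1 from by omega,
            List.range'_succ]
        simp
      · have hB : chopExtendB eventList n t (f + 1) idx = idx := by
          simp only [chopExtendB]
          rw [if_neg (by rintro ⟨_, hc⟩; exact h2 hc)]
        simp only [chopExtendA]
        rw [if_pos h1, if_neg h2, hB]
        simp
    · have hB : chopExtendB eventList n t (f + 1) idx = idx := by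
        simp only [chopExtendB]
        rw [if_neg (by rintro ⟨hc, _⟩; exact h1 (by omega))]
      simp [chopExtendA, if_neg h1, hB]

theorem findEnd_some_bounds (eventList : List (List (String × String))) (n : Nat) :
    ∀ fuel j jend, chopFindEnd eventList n fuel j = some jend → j ≤ jend ∧ jend < n := by
  intro fuel
  induction fuel with
  | zero => intro j jend h; simp [chopFindEnd] at h
  | succ f ih =>
    intro j jend h
    simp only [chopFindEnd] at h
    by_cases hj : j < n
    · rw [if_pos hj] at h
      by_cases hd : descriptionhas (eventList.getD j []) "endadmission" = true
      · rw [if_pos hd] at h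
        cases h
        exact ⟨le_refl j, hj⟩
      · rw [if_neg hd] at h
        have := ih (j + 1) jend h
        exact ⟨by omega, this.2⟩
    · rw [if_neg hj] at h; cases h

theorem scanB_nil (eventList : List (List (String × String))) (n : Nat) (fuel i : Nat)
    (h : n ≤ i) : chopScanB eventList n fuel i = [] := by
  cases fuel with
  | zero => rfl
  | succ f => simp only [chopScanB]; rw [if_neg (by omega)]

theorem scanB_fuel_inv (eventList : List (List (String × String))) (n : Nat) :
    ∀ fuel fuel' i, n - i ≤ fuel → n - i ≤ fuel' →
      chopScanB eventList n fuel i = chopScanB eventList n fuel' i := by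
  intro fuel
  induction fuel with
  | zero =>
    intro fuel' i h h'
    rw [scanB_nil eventList n 0 i (by omega), scanB_nil eventList n fuel' i (by omega)]
  | succ f ih =>
    intro fuel' i h h'
    by_cases hi : i < n
    · obtain ⟨f', rfl⟩ : ∃ f', fuel' = f' + 1 := ⟨fuel' - 1, by omega⟩
      simp only [chopScanB, if_pos hi]
      by_cases hs : descriptionhas (eventList.getD i []) "startadmission" = true
      · rw [if_pos hs, if_pos hs]
        cases hFE : chopFindEnd eventList n (n - i) i with
        | none => rfl
        | some j =>
          have hjb := findEnd_some_bounds eventList n (n - i) i j hFE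
          have hk := extendB_ge eventList n
            (valuefromevent (eventList.getD j []) "starttime") (n - 1 - j) j
          simp only []
          congr 1
          exact ih f' _ (by omega) (by omega)
      · rw [if_neg hs, if_neg hs]
        exact ih f' (i + 1) (by omega) (by omega)
    · rw [scanB_nil eventList n _ i (by omega), scanB_nil eventList n fuel' i (by omega)]

theorem scanB_bounds (eventList : List (List (String × String))) (n : Nat) :
    ∀ fuel i p, p ∈ chopScanB eventList n fuel i → p.1 ≤ p.2 ∧ p.2 < n := by
  intro fuel
  induction fuel with
  | zero => intro i p hp; simp [chopScanB] at hp
  | succ f ih =>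
    intro i p hp
    simp only [chopScanB] at hp
    by_cases hi : i < n
    · rw [if_pos hi] at hp
      by_cases hs : descriptionhas (eventList.getD i []) "startadmission" = true
      · rw [if_pos hs] at hp
        cases hFE : chopFindEnd eventList n (n - i) i with
        | none => rw [hFE] at hp; simp at hp
        | some j =>
          rw [hFE] at hp
          simp only [List.mem_cons] at hp
          have hjb := findEnd_some_bounds eventList n (n - i) i j hFE
          have hk := extendB_ge eventList n
            (valuefromevent (eventList.getD j []) "starttime") (n - 1 - j) j
          have hkn := extendB_lt eventList n
            (valuefromevent (eventList.getD j []) "starttime") (n - 1 - j) j hjb.2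
          rcases hp with hp | hp
          · subst hp; exact ⟨by omega, by omega⟩
          · exact ih _ p hp
      · rw [if_neg hs] at hp; exact ih _ p hp
    · rw [if_neg hi] at hp; simp at hp

theorem drop_take_eq_map_range' {α : Type} (d : α) :
    ∀ (xs : List α) (a m : Nat), a + m ≤ xs.length →
      (xs.drop a).take m = (List.range' a m).map (fun q => xs.getD q d) := by
  intro xs a m
  induction m generalizing a with
  | zero => intro _; simp
  | succ m ih =>
    intro h
    have ha : a < xs.length := by omega
    rw [List.drop_eq_getElem_cons ha, List.range'_succ, List.map_cons, List.take_succ_cons,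
        ih (a + 1) (by omega), List.getD_eq_getElem xs _ ha]

theorem seg_cons (eventList : List (List (String × String))) (j k : Nat) (h : j ≤ k) :
    chopSeg eventList j k = eventList.getD j [] :: chopSeg eventList (j + 1) k := by
  unfold chopSeg
  rw [show k + 1 - j = (k + 1 - (j + 1)) + 1 from by omega, List.range'_succ, List.map_cons]

theorem descHas_none (e : List (String × String)) (c : String)
    (hd : valuefromevent e "description" = none) : descriptionhas e c = false := by
  simp [descriptionhas, hd]

theorem descHas_some (e : List (String × String)) (c d : String)
    (hd : valuefromevent e "description" = some d) :
    descriptionhas e c = PySem.Str.isIn c d := by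
  simp [descriptionhas, hd]

theorem pyGet_getD (eventList : List (List (String × String))) (i : Nat)
    (hi : i < eventList.length) :
    PySem.List.pyGet? eventList (i : Int) = some (eventList.getD i []) := by
  rw [PySem.List.pyGet?_natCast, List.getElem?_eq_getElem hi, List.getD_eq_getElem eventList _ hi]

theorem pyGet_none (eventList : List (List (String × String))) (i : Nat)
    (hi : eventList.length ≤ i) :
    PySem.List.pyGet? eventList (i : Int) = none := by
  rw [PySem.List.pyGet?_natCast, List.getElem?_eq_none hi]

theorem loopA_skip (eventList : List (List (String × String))) (n f i : Nat)
    (col : List (List (String × String))) (acc : List (List (List (String × String))))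
    (hi : i < eventList.length)
    (hs : descriptionhas (eventList.getD i []) "startadmission" = false) :
    chopLoopA eventList n (f + 1) i false col acc =
      if i + 1 = n then acc else chopLoopA eventList n f (i + 1) false col acc := by
  have hKI := keyinevent_eq_isSome (eventList.getD i []) "description"
  simp only [chopLoopA, pyGet_getD eventList i hi]
  cases hd : valuefromevent (eventList.getD i []) "description" with
  | none =>
    have hk : keyinevent (eventList.getD i []) "description" = false := by rw [hKI, hd]; rfl
    simp only [List.getD_eq_getElem?_getD] at hk
    simp [hk]
  | some d =>
    have hk : keyinevent (eventList.getD i []) "description" = true := by rw [hKI, hd]; rfl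
    have hsi : PySem.Str.isIn "startadmission" d = false := by
      rw [descHas_some _ _ _ hd] at hs; exact hs
    simp only [List.getD_eq_getElem?_getD] at hd hk
    simp at hsi
    simp [hk, hsi]

theorem loopA_start_noend (eventList : List (List (String × String))) (n f i : Nat)
    (col : List (List (String × String))) (acc : List (List (List (String × String))))
    (hi : i < eventList.length)
    (hs : descriptionhas (eventList.getD i []) "startadmission" = true)
    (he : ¬ descriptionhas (eventList.getD i []) "endadmission" = true) :
    chopLoopA eventList n (f + 1) i false col acc =
      if i + 1 = n then acc
      else chopLoopA eventList n f (i + 1) true [eventList.getD i []] acc := by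
  have hKI := keyinevent_eq_isSome (eventList.getD i []) "description"
  cases hd : valuefromevent (eventList.getD i []) "description" with
  | none => rw [descHas_none _ _ hd] at hs; cases hs
  | some d =>
    have hk : keyinevent (eventList.getD i []) "description" = true := by rw [hKI, hd]; rfl
    have hsi : PySem.Str.isIn "startadmission" d = true := by
      rw [descHas_some _ _ _ hd] at hs; exact hs
    have hei : PySem.Str.isIn "endadmission" d = false := by
      rw [descHas_some _ _ _ hd] at he; exact Bool.not_eq_true _ ▸ (Bool.eq_false_iff.mpr (fun hc => he hc))
    simp only [chopLoopA, pyGet_getD eventList i hi]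
    simp only [List.getD_eq_getElem?_getD] at hd hk
    simp at hsi hei
    simp [hd, hk, hsi, hei]

theorem loopA_start_end (eventList : List (List (String × String))) (n f i : Nat)
    (col : List (List (String × String))) (acc : List (List (List (String × String))))
    (hi : i < eventList.length)
    (hs : descriptionhas (eventList.getD i []) "startadmission" = true)
    (he : descriptionhas (eventList.getD i []) "endadmission" = true) :
    chopLoopA eventList n (f + 1) i false col acc =
      (if (chopExtendA eventList n (valuefromevent (eventList.getD i []) "starttime")
            (n - 1 - i) i [eventList.getD i []]).1 + 1 = n
       then acc ++ [(chopExtendA eventList n (valuefromevent (eventList.getD i []) "starttime")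
            (n - 1 - i) i [eventList.getD i []]).2]
       else chopLoopA eventList n f
            ((chopExtendA eventList n (valuefromevent (eventList.getD i []) "starttime")
              (n - 1 - i) i [eventList.getD i []]).1 + 1) false
            (chopExtendA eventList n (valuefromevent (eventList.getD i []) "starttime")
              (n - 1 - i) i [eventList.getD i []]).2
            (acc ++ [(chopExtendA eventList n (valuefromevent (eventList.getD i []) "starttime")
              (n - 1 - i) i [eventList.getD i []]).2])) := by
  have hKI := keyinevent_eq_isSome (eventList.getD i []) "description"
  cases hd : valuefromevent (eventList.getD i []) "description" with
  | none => rw [descHas_none _ _ hd] at hs; cases hs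
  | some d =>
    have hk : keyinevent (eventList.getD i []) "description" = true := by rw [hKI, hd]; rfl
    have hsi : PySem.Str.isIn "startadmission" d = true := by
      rw [descHas_some _ _ _ hd] at hs; exact hs
    have hei : PySem.Str.isIn "endadmission" d = true := by
      rw [descHas_some _ _ _ hd] at he; exact he
    simp only [chopLoopA, pyGet_getD eventList i hi]
    simp only [List.getD_eq_getElem?_getD] at hd hk
    simp at hsi hei
    simp [hd, hk, hsi, hei]

theorem loopA_inadm_noend (eventList : List (List (String × String))) (n f j : Nat)
    (col : List (List (String × String))) (acc : List (List (List (String × String))))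
    (hj : j < eventList.length)
    (he : ¬ descriptionhas (eventList.getD j []) "endadmission" = true) :
    chopLoopA eventList n (f + 1) j true col acc =
      if j + 1 = n then acc
      else chopLoopA eventList n f (j + 1) true (col ++ [eventList.getD j []]) acc := by
  have hKI := keyinevent_eq_isSome (eventList.getD j []) "description"
  cases hd : valuefromevent (eventList.getD j []) "description" with
  | none =>
    have hk : keyinevent (eventList.getD j []) "description" = false := by rw [hKI, hd]; rfl
    simp only [chopLoopA, pyGet_getD eventList j hj]
    simp only [List.getD_eq_getElem?_getD] at hd hk
    simp [hd, hk]
  | some d =>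
    have hk : keyinevent (eventList.getD j []) "description" = true := by rw [hKI, hd]; rfl
    have hei : PySem.Str.isIn "endadmission" d = false := by
      rw [descHas_some _ _ _ hd] at he; exact Bool.not_eq_true _ ▸ (Bool.eq_false_iff.mpr (fun hc => he hc))
    simp only [chopLoopA, pyGet_getD eventList j hj]
    simp only [List.getD_eq_getElem?_getD] at hd hk
    simp at hei
    simp [hd, hk, hei]

theorem loopA_inadm_end (eventList : List (List (String × String))) (n f j : Nat)
    (col : List (List (String × String))) (acc : List (List (List (String × String))))
    (hj : j < eventList.length)
    (he : descriptionhas (eventList.getD j []) "endadmission" = true) :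
    chopLoopA eventList n (f + 1) j true col acc =
      (if (chopExtendA eventList n (valuefromevent (eventList.getD j []) "starttime")
            (n - 1 - j) j (col ++ [eventList.getD j []])).1 + 1 = n
       then acc ++ [(chopExtendA eventList n (valuefromevent (eventList.getD j []) "starttime")
            (n - 1 - j) j (col ++ [eventList.getD j []])).2]
       else chopLoopA eventList n f
            ((chopExtendA eventList n (valuefromevent (eventList.getD j []) "starttime")
              (n - 1 - j) j (col ++ [eventList.getD j []])).1 + 1) false
            (chopExtendA eventList n (valuefromevent (eventList.getD j []) "starttime")
              (n - 1 - j) j (col ++ [eventList.getD j []])).2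
            (acc ++ [(chopExtendA eventList n (valuefromevent (eventList.getD j []) "starttime")
              (n - 1 - j) j (col ++ [eventList.getD j []])).2])) := by
  have hKI := keyinevent_eq_isSome (eventList.getD j []) "description"
  cases hd : valuefromevent (eventList.getD j []) "description" with
  | none => rw [descHas_none _ _ hd] at he; cases he
  | some d =>
    have hk : keyinevent (eventList.getD j []) "description" = true := by rw [hKI, hd]; rfl
    have hei : PySem.Str.isIn "endadmission" d = true := by
      rw [descHas_some _ _ _ hd] at he; exact he
    simp only [chopLoopA, pyGet_getD eventList j hj]
    simp only [List.getD_eq_getElem?_getD] at hd hk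
    simp at hei
    simp [hd, hk, hei]

theorem segA_group (eventList : List (List (String × String))) (j k : Nat)
    (col : List (List (String × String))) (h : j ≤ k) :
    (col ++ [eventList.getD j []]) ++
        (List.range' (j + 1) (k - j)).map (fun q => eventList.getD q []) =
      col ++ chopSeg eventList j k := by
  rw [seg_cons eventList j k h]
  unfold chopSeg
  rw [show k + 1 - (j + 1) = k - j from by omega]
  simp

theorem chop_main (eventList : List (List (String × String))) :
    ∀ fuel : Nat,
      (∀ i col acc, eventList.length - i ≤ fuel →
        chopLoopA eventList eventList.length fuel i false col acc =
          acc ++ (chopScanB eventList eventList.length (eventList.length - i) i).map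
            (fun sk => chopSeg eventList sk.1 sk.2)) ∧
      (∀ j col acc, eventList.length - j ≤ fuel → j < eventList.length →
        chopLoopA eventList eventList.length fuel j true col acc =
          acc ++ (match chopFindEnd eventList eventList.length (eventList.length - j) j with
            | none => []
            | some jend =>
              (col ++ chopSeg eventList j (chopExtendB eventList eventList.length
                  (valuefromevent (eventList.getD jend []) "starttime")
                  (eventList.length - 1 - jend) jend)) ::
                (chopScanB eventList eventList.length
                  (eventList.length - (chopExtendB eventList eventList.length
                    (valuefromevent (eventList.getD jend []) "starttime")
                    (eventList.length - 1 - jend) jend + 1))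
                  (chopExtendB eventList eventList.length
                    (valuefromevent (eventList.getD jend []) "starttime")
                    (eventList.length - 1 - jend) jend + 1)).map
                  (fun sk => chopSeg eventList sk.1 sk.2))) := by
  intro fuel
  induction fuel with
  | zero =>
    constructor
    · intro i col acc h
      rw [show eventList.length - i = 0 from by omega]
      show acc = acc ++ (chopScanB eventList eventList.length 0 i).map _
      simp [chopScanB]
    · intro j col acc h hj
      exact absurd hj (by omega)
  | succ f ih =>
    obtain ⟨ihP, ihQ⟩ := ih
    constructor
    · -- state inadmission = False
      intro i col acc h
      by_cases hi : i < eventList.length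
      · have hnf : eventList.length - i = (eventList.length - (i + 1)) + 1 := by omega
        by_cases hs : descriptionhas (eventList.getD i []) "startadmission" = true
        · by_cases hE : descriptionhas (eventList.getD i []) "endadmission" = true
          · -- a startadmission event that is itself the endadmission event
            have hFE : chopFindEnd eventList eventList.length (eventList.length - i) i = some i := by
              rw [hnf]; simp only [chopFindEnd]; rw [if_pos hi, if_pos hE]
            have hk0 := extendB_ge eventList eventList.length
              (valuefromevent (eventList.getD i []) "starttime") (eventList.length - 1 - i) i
            have hkn := extendB_lt eventList eventList.length
              (valuefromevent (eventList.getD i []) "starttime") (eventList.length - 1 - i) i hi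
            have hscan : chopScanB eventList eventList.length (eventList.length - i) i =
                (i, chopExtendB eventList eventList.length
                    (valuefromevent (eventList.getD i []) "starttime") (eventList.length - 1 - i) i) ::
                  chopScanB eventList eventList.length (eventList.length - (i + 1))
                    (chopExtendB eventList eventList.length
                      (valuefromevent (eventList.getD i []) "starttime") (eventList.length - 1 - i) i + 1) := by
              rw [hnf]; simp only [chopScanB]; rw [if_pos hi, if_pos hs, hFE]
            have hgrp : [eventList.getD i []] ++
                (List.range' (i + 1) (chopExtendB eventList eventList.length
                  (valuefromevent (eventList.getD i []) "starttime") (eventList.length - 1 - i) i - i)).map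
                  (fun q => eventList.getD q []) =
                chopSeg eventList i (chopExtendB eventList eventList.length
                  (valuefromevent (eventList.getD i []) "starttime") (eventList.length - 1 - i) i) := by
              have := segA_group eventList i (chopExtendB eventList eventList.length
                (valuefromevent (eventList.getD i []) "starttime") (eventList.length - 1 - i) i) [] hk0
              simpa using this
            rw [loopA_start_end eventList eventList.length f i col acc hi hs hE,
                extendA_eq eventList eventList.length
                  (valuefromevent (eventList.getD i []) "starttime") (eventList.length - 1 - i) i
                  [eventList.getD i []],
                hscan]
            dsimp only
            rw [hgrp]
            by_cases hlast : chopExtendB eventList eventList.length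
                (valuefromevent (eventList.getD i []) "starttime") (eventList.length - 1 - i) i + 1 =
                eventList.length
            · rw [if_pos hlast, scanB_nil eventList eventList.length _ _ (by omega)]
              simp
            · rw [if_neg hlast, ihP _ _ _ (by omega),
                  scanB_fuel_inv eventList eventList.length (eventList.length - (i + 1))
                    (eventList.length - (chopExtendB eventList eventList.length
                      (valuefromevent (eventList.getD i []) "starttime") (eventList.length - 1 - i) i + 1))
                    (chopExtendB eventList eventList.length
                      (valuefromevent (eventList.getD i []) "starttime") (eventList.length - 1 - i) i + 1)
                    (by omega) (by omega)]
              simp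
          · -- startadmission opens; the closing event (if any) is found further right
            have hFE : chopFindEnd eventList eventList.length (eventList.length - i) i =
                chopFindEnd eventList eventList.length (eventList.length - (i + 1)) (i + 1) := by
              rw [hnf]; simp only [chopFindEnd]; rw [if_pos hi, if_neg hE]
            have hscan : chopScanB eventList eventList.length (eventList.length - i) i =
                match chopFindEnd eventList eventList.length (eventList.length - (i + 1)) (i + 1) with
                | some j =>
                  (i, chopExtendB eventList eventList.length
                      (valuefromevent (eventList.getD j []) "starttime") (eventList.length - 1 - j) j) ::
                    chopScanB eventList eventList.length (eventList.length - (i + 1))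
                      (chopExtendB eventList eventList.length
                        (valuefromevent (eventList.getD j []) "starttime") (eventList.length - 1 - j) j + 1)
                | none => [] := by
              rw [hnf]; simp only [chopScanB]; rw [if_pos hi, if_pos hs, hFE]
            rw [loopA_start_noend eventList eventList.length f i col acc hi hs hE, hscan]
            by_cases hlast : i + 1 = eventList.length
            · rw [if_pos hlast, show eventList.length - (i + 1) = 0 from by omega,
                  show chopFindEnd eventList eventList.length 0 (i + 1) = none from rfl]
              simp
            · rw [if_neg hlast, ihQ (i + 1) [eventList.getD i []] acc (by omega) (by omega)]
              cases hFE2 : chopFindEnd eventList eventList.length (eventList.length - (i + 1)) (i + 1) with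
              | none => rfl
              | some jend =>
                have hb := findEnd_some_bounds eventList eventList.length _ _ _ hFE2
                have hk0 := extendB_ge eventList eventList.length
                  (valuefromevent (eventList.getD jend []) "starttime") (eventList.length - 1 - jend) jend
                dsimp only
                rw [scanB_fuel_inv eventList eventList.length (eventList.length - (i + 1))
                      (eventList.length - (chopExtendB eventList eventList.length
                      (valuefromevent (eventList.getD jend []) "starttime") (eventList.length - 1 - jend) jend + 1))
                      (chopExtendB eventList eventList.length
                      (valuefromevent (eventList.getD jend []) "starttime") (eventList.length - 1 - jend) jend + 1)
                      (by omega) (by omega)]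
                -- align the two fuels; then distribute the map and split off the head event
                simp only [List.map_cons]
                rw [seg_cons eventList i (chopExtendB eventList eventList.length
                      (valuefromevent (eventList.getD jend []) "starttime")
                      (eventList.length - 1 - jend) jend) (by omega)]
                simp
        · -- no admission opens here
          have hs' : descriptionhas (eventList.getD i []) "startadmission" = false :=
            Bool.eq_false_iff.mpr hs
          have hscan : chopScanB eventList eventList.length (eventList.length - i) i =
              chopScanB eventList eventList.length (eventList.length - (i + 1)) (i + 1) := by
            rw [hnf]; simp only [chopScanB]; rw [if_pos hi, if_neg hs]
          rw [loopA_skip eventList eventList.length f i col acc hi hs', hscan]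
          by_cases hlast : i + 1 = eventList.length
          · rw [if_pos hlast, scanB_nil eventList eventList.length _ _ (by omega)]
            simp
          · rw [if_neg hlast, ihP (i + 1) col acc (by omega)]
      · -- i past the end (only reachable on the empty list)
        simp only [chopLoopA, pyGet_none eventList i (by omega)]
        rw [scanB_nil eventList eventList.length _ _ (by omega)]
        simp
    · -- state inadmission = True
      intro j col acc h hj
      have hnf : eventList.length - j = (eventList.length - (j + 1)) + 1 := by omega
      by_cases hE : descriptionhas (eventList.getD j []) "endadmission" = true
      · -- the admission closes here; the same-starttime extension follows
        have hFE : chopFindEnd eventList eventList.length (eventList.length - j) j = some j := by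
          rw [hnf]; simp only [chopFindEnd]; rw [if_pos hj, if_pos hE]
        have hk0 := extendB_ge eventList eventList.length
          (valuefromevent (eventList.getD j []) "starttime") (eventList.length - 1 - j) j
        have hkn := extendB_lt eventList eventList.length
          (valuefromevent (eventList.getD j []) "starttime") (eventList.length - 1 - j) j hj
        rw [loopA_inadm_end eventList eventList.length f j col acc hj hE,
            extendA_eq eventList eventList.length
              (valuefromevent (eventList.getD j []) "starttime") (eventList.length - 1 - j) j
              (col ++ [eventList.getD j []]),
            hFE]
        dsimp only
        rw [segA_group eventList j (chopExtendB eventList eventList.length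
              (valuefromevent (eventList.getD j []) "starttime") (eventList.length - 1 - j) j) col hk0]
        by_cases hlast : chopExtendB eventList eventList.length
            (valuefromevent (eventList.getD j []) "starttime") (eventList.length - 1 - j) j + 1 =
            eventList.length
        · rw [if_pos hlast, scanB_nil eventList eventList.length _ _ (by omega)]
          simp
        · rw [if_neg hlast, ihP _ _ _ (by omega)]
          simp
      · -- still inside the admission: keep collecting
        have hFE : chopFindEnd eventList eventList.length (eventList.length - j) j =
            chopFindEnd eventList eventList.length (eventList.length - (j + 1)) (j + 1) := by
          rw [hnf]; simp only [chopFindEnd]; rw [if_pos hj, if_neg hE]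
        rw [loopA_inadm_noend eventList eventList.length f j col acc hj hE, hFE]
        by_cases hlast : j + 1 = eventList.length
        · rw [if_pos hlast, show eventList.length - (j + 1) = 0 from by omega,
              show chopFindEnd eventList eventList.length 0 (j + 1) = none from rfl]
          simp
        · rw [if_neg hlast, ihQ (j + 1) (col ++ [eventList.getD j []]) acc (by omega) (by omega)]
          cases hFE2 : chopFindEnd eventList eventList.length (eventList.length - (j + 1)) (j + 1) with
          | none => rfl
          | some jend =>
            have hb := findEnd_some_bounds eventList eventList.length _ _ _ hFE2
            have hk0 := extendB_ge eventList eventList.length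
              (valuefromevent (eventList.getD jend []) "starttime") (eventList.length - 1 - jend) jend
            dsimp only
            rw [seg_cons eventList j (chopExtendB eventList eventList.length
                  (valuefromevent (eventList.getD jend []) "starttime")
                  (eventList.length - 1 - jend) jend) (by omega)]
            simp

-- ===== VERDICT (by name: the statement is the Claim_ definition above) =====
theorem chopeventlist_spec : Claim_equal_chopeventlist := by
  intro eventList _hDom _hPre
  unfold Spec_chopeventlist chopeventlist chopeventlist_alt
  have hP := (chop_main eventList eventList.length).1 0 [] [] (by omega)
  rw [hP, Nat.sub_zero, List.nil_append]
  apply List.map_congr_left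
  intro sk hsk
  have hb := scanB_bounds eventList eventList.length _ _ sk hsk
  rw [PySem.List.slice_natCast,
      drop_take_eq_map_range' ([]) eventList sk.1 (sk.2 + 1 - sk.1) (by omega)]
  rfl
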